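-- pv_equiv track=rewrite | github.com/GranusClarvis/clarvis | scripts/challenges/thompson_nfa.py | _char_matches
-- ===== SOURCE A (Python) =====
-- def _char_matches(char_token: str, ch: str) -> bool:
--     """Check if a character matches a token (literal, class, or escaped)."""
--     if char_token == '.':
--         # In our grammar '.' is concat — for wildcard use \\. explicitly
--         # Treat single '.' literal as matching any char (not used as operator here)
--         return True
--     if char_token.startswith('[') and char_token.endswith(']'):
--         # Character class: [a-z], [abc], [a-zA-Z0-9]
--         inner = char_token[1:-1]
--         negate = inner.startswith('^')
--         if negate:
--             inner = inner[1:]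
--         i = 0
--         matched = False
--         while i < len(inner):
--             if i + 2 < len(inner) and inner[i + 1] == '-':
--                 # Range: a-z
--                 if inner[i] <= ch <= inner[i + 2]:
--                     matched = True
--                 i += 3
--             else:
--                 if inner[i] == ch:
--                     matched = True
--                 i += 1
--         return matched != negate
--     if char_token.startswith('\\') and len(char_token) == 2:
--         return ch == char_token[1]
--     # Plain literal
--     return ch == char_token
-- ===== SOURCE B (Python) =====
-- def _parse_class(s):
--     # Parse class body into (lo, hi) interval items; a standalone literal c becomes (c, c).
--     if not s:
--         return []
--     if len(s) > 2 and s[1] == '-':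
--         return [(s[0], s[2])] + _parse_class(s[3:])
--     return [(s[0], s[0])] + _parse_class(s[1:])
--
--
-- def _char_matches(char_token: str, ch: str) -> bool:
--     if char_token == '.':
--         return True
--     if char_token.startswith('[') and char_token.endswith(']'):
--         inner = char_token[1:-1]
--         negate = inner.startswith('^')
--         if negate:
--             inner = inner[1:]
--         return any(lo <= ch <= hi for (lo, hi) in _parse_class(inner)) != negate
--     if char_token.startswith('\\') and len(char_token) == 2:
--         return ch == char_token[1]
--     return ch == char_token
-- ===== Notes on version B (the rewrite author's own statement) =====
-- stated objective: alternative
-- what changed: The character-class branch is split into two phases: a recursive parser that turns the class body into a list of (lo, hi) interval items (literals become (c, c)), then a single `any` membership test over the items, replacing A's index-stepping while loop that interleaves range detection with a mutable `matched` flag.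
import Mathlib
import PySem

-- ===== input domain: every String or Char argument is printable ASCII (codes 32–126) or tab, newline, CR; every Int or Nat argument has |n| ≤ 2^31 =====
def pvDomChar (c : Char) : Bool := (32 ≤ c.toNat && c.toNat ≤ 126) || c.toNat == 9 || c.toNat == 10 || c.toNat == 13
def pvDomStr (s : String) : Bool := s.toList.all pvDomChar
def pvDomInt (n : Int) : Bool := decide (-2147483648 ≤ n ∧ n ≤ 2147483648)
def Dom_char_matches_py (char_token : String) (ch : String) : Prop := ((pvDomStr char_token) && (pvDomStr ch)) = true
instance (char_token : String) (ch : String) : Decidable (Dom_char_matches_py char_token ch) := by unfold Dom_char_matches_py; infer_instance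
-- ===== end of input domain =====

-- B parses the character class once into a list of (lo, hi) interval items and tests membership
-- with `any`, replacing A's index-stepping while loop with a matched flag (objective: alternative).

-- Shared primitive: Python's lexicographic string `<=` on code points (exact for `str <= str`).
def pyStrLe : List Char → List Char → Bool
  | [], _ => true
  | _ :: _, [] => false
  | a :: as, b :: bs => if a = b then pyStrLe as bs else decide (a.toNat < b.toNat)

-- ===== PORT A =====
-- A's while loop over `inner`, index i rendered as the remaining suffix, with the `matched` flag.
def chLoopA (s : List Char) (c : List Char) (matched : Bool) : Bool :=
  match s with
  | a :: b :: x :: rest =>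
    if b = '-' then
      chLoopA rest c (matched || (pyStrLe [a] c && pyStrLe c [x]))
    else
      chLoopA (b :: x :: rest) c (matched || decide (c = [a]))
  | a :: rest => chLoopA rest c (matched || decide (c = [a]))
  | [] => matched

def char_matches_py (char_token : String) (ch : String) : Bool :=
  let t := char_token.toList
  let c := ch.toList
  if t = ['.'] then true
  else if t.head? = some '[' ∧ t.getLast? = some ']' then
    let inner := (t.drop 1).dropLast
    let negate := inner.head? = some '^'
    let inner' := if negate then inner.drop 1 else inner
    chLoopA inner' c false != negate
  else
    match t with
    | ['\\', x] => decide (c = [x])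
    | _ => decide (c = t)

-- ===== PORT B =====
-- B's recursive class parser: standalone literal c becomes the item (c, c), a range becomes (lo, hi).
def parseClassB : List Char → List (Char × Char)
  | [] => []
  | a :: b :: x :: rest =>
    if b = '-' then (a, x) :: parseClassB rest
    else (a, a) :: parseClassB (b :: x :: rest)
  | a :: rest => (a, a) :: parseClassB rest

def char_matches_py_alt (char_token : String) (ch : String) : Bool :=
  let t := char_token.toList
  let c := ch.toList
  if t = ['.'] then true
  else if t.head? = some '[' ∧ t.getLast? = some ']' then
    let inner := (t.drop 1).dropLast
    let negate := inner.head? = some '^'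
    let inner' := if negate then inner.drop 1 else inner
    ((parseClassB inner').any (fun p => pyStrLe [p.1] c && pyStrLe c [p.2])) != negate
  else if t.length = 2 ∧ t.head? = some '\\' then decide (c = t.drop 1)
  else decide (c = t)

-- ===== PRECONDITION & SPEC =====
def Spec_char_matches_py (char_token : String) (ch : String) (out : Bool) : Prop := out = char_matches_py_alt char_token ch
instance (char_token : String) (ch : String) (out : Bool) : Decidable (Spec_char_matches_py char_token ch out) := by unfold Spec_char_matches_py; infer_instance

-- ===== CLAIM (what is proved, stated in full; the proofs are below) =====
def Claim_equal_char_matches_py : Prop := ∀ (char_token : String) (ch : String), Dom_char_matches_py char_token ch → Spec_char_matches_py char_token ch (char_matches_py char_token ch)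

-- ===== LEMMAS AND PROOFS =====

lemma pyStrLe_antisymm (x : List Char) : ∀ y : List Char, (pyStrLe x y && pyStrLe y x) = decide (x = y) := by
  induction x with
  | nil => intro y; cases y <;> simp [pyStrLe]
  | cons a as ih =>
    intro y
    cases y with
    | nil => simp [pyStrLe]
    | cons b bs =>
      by_cases h : a = b
      · subst h; simp [pyStrLe, ih]
      · have h' : b ≠ a := fun hh => h hh.symm
        have hf : (decide (a.toNat < b.toNat) && decide (b.toNat < a.toNat)) = false := by
          simp only [Bool.and_eq_false_iff, decide_eq_false_iff_not]; omega
        simp only [pyStrLe, if_neg h, if_neg h', hf, List.cons.injEq]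
        simp [h]

lemma loop_eq_parse (c : List Char) : ∀ (s : List Char) (m : Bool),
    chLoopA s c m = (m || (parseClassB s).any (fun p => pyStrLe [p.1] c && pyStrLe c [p.2])) := by
  intro s
  induction s using parseClassB.induct with
  | case1 => intro m; simp [chLoopA, parseClassB]
  | case2 a x rest ih =>
    intro m
    simp [chLoopA, parseClassB, ih, Bool.or_assoc]
  | case3 a b x rest hb ih =>
    intro m
    simp [chLoopA, parseClassB, hb, ih, pyStrLe_antisymm, Bool.or_assoc, eq_comm]
  | case4 a rest h ih =>
    intro m
    cases rest with
    | nil => simp [chLoopA, parseClassB, pyStrLe_antisymm, eq_comm]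
    | cons r rs =>
      cases rs with
      | nil =>
        simp [chLoopA, parseClassB, pyStrLe_antisymm, Bool.or_assoc, eq_comm]
      | cons r2 rs2 => exact absurd rfl (h r r2 rs2)

-- ===== VERDICT (by name: the statement is the Claim_ definition above) =====
theorem char_matches_py_spec : Claim_equal_char_matches_py := by
  intro char_token ch _
  unfold Spec_char_matches_py char_matches_py char_matches_py_alt
  simp only [loop_eq_parse, Bool.false_or]
  by_cases h1 : char_token.toList = ['.']
  · simp [h1]
  by_cases h2 : char_token.toList.head? = some '[' ∧ char_token.toList.getLast? = some ']'
  · simp [h1, h2]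
  · simp only [if_neg h1, if_neg h2]
    rcases char_token.toList with _ | ⟨c1, _ | ⟨c2, _ | ⟨c3, rest⟩⟩⟩
    · simp
    · simp
    · by_cases hc : c1 = '\\'
      · subst hc; simp
      · rw [if_neg (by simp [hc])]
        split <;> simp_all
    · simp
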